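-- pv_equiv track=rewrite | github.com/ubernaut/domain-words | domains.py | find_domains
-- ===== SOURCE A (Python) =====
-- def find_domains(words, tlds):
--     matches = []
--     for word in words:
--         for tld in tlds:
--             if (word.lower().endswith(tld.lower()) and word != "" and word != tld):
--                 match = word[:-len(tld)] + "." + tld.lower()
--                 if(match.startswith(".") == False):
--                     matches.append(match)
--     return matches
-- ===== SOURCE B (Python) =====
-- def find_domains(words, tlds):
--     # Bucket tlds by lowercased value; per word probe only the distinct tld lengths.
--     buckets = {}
--     for i, t in enumerate(tlds):
--         buckets.setdefault(t.lower(), []).append((i, t))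
--     lengths = sorted({len(t) for t in tlds if t})
--     out = []
--     for word in words:
--         if word == "":
--             continue
--         wl = word.lower()
--         found = []
--         for L in lengths:
--             if len(wl) < L:
--                 continue
--             suf = wl[len(wl) - L:]
--             for i, t in buckets.get(suf, []):
--                 if word != t:
--                     prefix = word[:len(word) - L]
--                     if prefix != "" and not prefix.startswith("."):
--                         found.append((i, prefix + "." + suf))
--         found.sort(key=lambda p: p[0])
--         out.extend(m for _, m in found)
--     return out
-- ===== Notes on version B (the rewrite author's own statement) =====
-- stated objective: faster
-- what changed: Instead of testing every word against every tld, B buckets the tlds once in a dict keyed by lowercased value, probes each word's suffix only at the distinct tld lengths, and sorts each word's matches back into original tld order by index.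
import Mathlib
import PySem

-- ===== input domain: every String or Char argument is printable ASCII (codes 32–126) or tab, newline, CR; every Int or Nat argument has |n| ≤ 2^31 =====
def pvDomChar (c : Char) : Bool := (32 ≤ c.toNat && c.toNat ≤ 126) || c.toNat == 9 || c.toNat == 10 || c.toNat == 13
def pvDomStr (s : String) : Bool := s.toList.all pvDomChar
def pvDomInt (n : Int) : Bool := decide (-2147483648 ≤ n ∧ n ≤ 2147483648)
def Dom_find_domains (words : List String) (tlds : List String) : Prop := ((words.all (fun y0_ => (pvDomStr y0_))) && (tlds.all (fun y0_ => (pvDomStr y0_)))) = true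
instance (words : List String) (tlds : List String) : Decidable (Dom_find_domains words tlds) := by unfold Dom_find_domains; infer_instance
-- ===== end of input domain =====

-- B buckets the tlds by lowercased value in a dict and probes only the distinct tld
-- lengths per word, sorting each word's accM back into tld order by index.
-- Python string concatenation 'x + y' is ported exactly as list append on the code
-- points (String.ofList (x.toList ++ y.toList)).

-- ===== PORT A =====
def find_domains (words : List String) (tlds : List String) : List String :=
  words.foldl (fun accM word =>
    tlds.foldl (fun accM tld =>
      if PySem.Str.endswith (PySem.Str.lower word) (PySem.Str.lower tld)
          && !(word == "") && !(word == tld) then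
        let m : String := String.ofList ((PySem.Str.slice word none (some (-(PySem.Str.len tld)))).toList
                                      ++ ['.'] ++ (PySem.Str.lower tld).toList)
        if PySem.Str.startswith m "." == false then accM ++ [m] else accM
      else accM) accM) []

-- ===== PORT B =====
def find_domains_alt (words : List String) (tlds : List String) : List String :=
  let buckets : PySem.Dict String (List (Int × String)) :=
    (PySem.List.enumerate tlds 0).foldl
      (fun d p => d.modify (PySem.Str.lower p.2) [] (· ++ [p]))  -- setdefault(..., []).append(p)
      PySem.Dict.empty
  let lengths : List Int :=
    PySem.List.sorted (PySem.Set.ofList ((tlds.filter (fun t => !(t == ""))).map PySem.Str.len))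
      (fun x => x) false
  words.foldl (fun out word =>
    if word == "" then out else
    let wl := PySem.Str.lower word
    let found : List (Int × String) :=
      lengths.foldl (fun found L =>
        if PySem.Str.len wl < L then found else
        let suf := PySem.Str.slice wl (some (PySem.Str.len wl - L)) none
        (buckets.getD suf []).foldl (fun found p =>
          if !(word == p.2) then
            let pre := PySem.Str.slice word none (some (PySem.Str.len word - L))
            if !(pre == "") && PySem.Str.startswith pre "." == false then
              found ++ [(p.1, String.ofList (pre.toList ++ ['.'] ++ suf.toList))]
            else found
          else found) found) []
    out ++ (PySem.List.sorted found (fun p => p.1) false).map (·.2)) []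

-- ===== PRECONDITION & SPEC =====
def Spec_find_domains (words : List String) (tlds : List String) (out : List String) : Prop := out = find_domains_alt words tlds
instance (words : List String) (tlds : List String) (out : List String) : Decidable (Spec_find_domains words tlds out) := by unfold Spec_find_domains; infer_instance

-- ===== CLAIM (what is proved, stated in full; the proofs are below) =====
def Claim_equal_find_domains : Prop := ∀ (words : List String) (tlds : List String), Dom_find_domains words tlds → Spec_find_domains words tlds (find_domains words tlds)

-- ===== LEMMAS AND PROOFS =====

-- proof-side abbreviations for A's per-tld match value and condition
def pvM (w t : String) : String :=
  String.ofList ((PySem.Str.slice w none (some (-(PySem.Str.len t)))).toList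
                  ++ ['.'] ++ (PySem.Str.lower t).toList)

def pvQ (w t : String) : Bool :=
  (PySem.Str.endswith (PySem.Str.lower w) (PySem.Str.lower t) && !(w == "") && !(w == t))
    && (PySem.Str.startswith (pvM w t) "." == false)

-- proof-side names for B's internals
def pvBuckets (tlds : List String) : PySem.Dict String (List (Int × String)) :=
  (PySem.List.enumerate tlds 0).foldl
    (fun d p => d.modify (PySem.Str.lower p.2) [] (· ++ [p])) PySem.Dict.empty

def pvLengths (tlds : List String) : List Int :=
  PySem.List.sorted (PySem.Set.ofList ((tlds.filter (fun t => !(t == ""))).map PySem.Str.len))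
    (fun x => x) false

def pvSuf (w : String) (L : Int) : String :=
  PySem.Str.slice (PySem.Str.lower w) (some (PySem.Str.len (PySem.Str.lower w) - L)) none

def pvPre (w : String) (L : Int) : String :=
  PySem.Str.slice w none (some (PySem.Str.len w - L))

def pvC (w : String) (L : Int) (p : Int × String) : Bool :=
  !(w == p.2) && (!(pvPre w L == "") && (PySem.Str.startswith (pvPre w L) "." == false))

def pvOut (w : String) (L : Int) (p : Int × String) : Int × String :=
  (p.1, String.ofList ((pvPre w L).toList ++ ['.'] ++ (pvSuf w L).toList))

def pvP (w : String) (L : Int) (p : Int × String) : Bool :=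
  if PySem.Str.len (PySem.Str.lower w) < L then false
  else (PySem.Str.lower p.2 == pvSuf w L) && pvC w L p

def pvFound (tlds : List String) (w : String) : List (Int × String) :=
  (pvLengths tlds).foldl (fun found L =>
    if PySem.Str.len (PySem.Str.lower w) < L then found else
    ((pvBuckets tlds).getD (pvSuf w L) []).foldl (fun found p =>
      if !(w == p.2) then
        if !(pvPre w L == "") && PySem.Str.startswith (pvPre w L) "." == false then
          found ++ [(p.1, String.ofList ((pvPre w L).toList ++ ['.'] ++ (pvSuf w L).toList))]
        else found
      else found) found) []

def pvF (w : String) (p : Int × String) : Int × String := (p.1, pvM w p.2)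

-- A's result as one flatMap
theorem pvA_flat (words tlds : List String) :
    find_domains words tlds
      = words.flatMap (fun w => (tlds.filter (fun t => pvQ w t)).map (pvM w)) := by
  unfold find_domains
  have hinner : ∀ (w : String) (acc : List String),
      tlds.foldl (fun accM tld =>
        if PySem.Str.endswith (PySem.Str.lower w) (PySem.Str.lower tld)
            && !(w == "") && !(w == tld) then
          let m : String := String.ofList ((PySem.Str.slice w none (some (-(PySem.Str.len tld)))).toList
                                            ++ ['.'] ++ (PySem.Str.lower tld).toList)
          if PySem.Str.startswith m "." == false then accM ++ [m] else accM
        else accM) acc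
        = acc ++ (tlds.filter (fun t => pvQ w t)).map (pvM w) := by
    intro w acc
    rw [← PySem.List.foldl_append_if (p := fun t => pvQ w t) (f := pvM w)]
    apply PySem.List.foldl_congr_mem
    intro a t _
    by_cases h1 : (PySem.Str.endswith (PySem.Str.lower w) (PySem.Str.lower t)
        && !(w == "") && !(w == t)) = true <;>
      by_cases h2 : (PySem.Str.startswith (pvM w t) "." == false) = true <;>
        simp_all [pvQ, pvM]
  calc words.foldl (fun accM word => tlds.foldl _ accM) []
      = words.foldl (fun acc w => acc ++ (tlds.filter (fun t => pvQ w t)).map (pvM w)) [] := by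
        apply PySem.List.foldl_congr_mem
        intro acc w _
        exact hinner w acc
    _ = words.flatMap (fun w => (tlds.filter (fun t => pvQ w t)).map (pvM w)) := by
        rw [PySem.List.foldl_append_eq_flatMap]; simp

-- B's result as one flatMap
theorem pvB_flat (words tlds : List String) :
    find_domains_alt words tlds
      = words.flatMap (fun w => if w == "" then [] else
          (PySem.List.sorted (pvFound tlds w) (fun p => p.1) false).map (·.2)) := by
  show words.foldl (fun out w =>
      if w == "" then out
      else out ++ (PySem.List.sorted (pvFound tlds w) (fun p => p.1) false).map (·.2)) []
    = _
  calc words.foldl _ []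
      = words.foldl (fun out w => out ++ (if w == "" then [] else
          (PySem.List.sorted (pvFound tlds w) (fun p => p.1) false).map (·.2))) [] := by
        apply PySem.List.foldl_congr_mem
        intro out w _
        by_cases h : (w == "") = true <;> simp [h]
    _ = _ := by rw [PySem.List.foldl_append_eq_flatMap]; simp

-- the bucket dict is a grouping of the enumerated tlds by lowercased value
theorem pvBuckets_getD (tlds : List String) (suf : String) :
    (pvBuckets tlds).getD suf []
      = (PySem.List.enumerate tlds 0).filter (fun p => PySem.Str.lower p.2 == suf) := by
  unfold pvBuckets
  rw [show (PySem.List.enumerate tlds 0).foldl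
        (fun (d : PySem.Dict String (List (Int × String))) p =>
          d.modify (PySem.Str.lower p.2) [] (· ++ [p])) PySem.Dict.empty
      = ((PySem.List.enumerate tlds 0).map (fun p => (PySem.Str.lower p.2, p))).foldl
          (fun (d : PySem.Dict String (List (Int × String))) q =>
            d.modify q.1 [] (· ++ [q.2])) PySem.Dict.empty from
        (List.foldl_map (f := fun p : Int × String => (PySem.Str.lower p.2, p))
          (g := fun (d : PySem.Dict String (List (Int × String))) q =>
            d.modify q.1 [] (· ++ [q.2]))).symm]
  rw [PySem.Dict.getD_foldl_modify_append]
  simp [List.filter_map, List.map_map, Function.comp_def]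

-- B's per-word accumulation, as a flatMap over the distinct lengths
theorem pvFound_flat (tlds : List String) (w : String) :
    pvFound tlds w
      = (pvLengths tlds).flatMap (fun L =>
          ((PySem.List.enumerate tlds 0).filter (pvP w L)).map (pvOut w L)) := by
  unfold pvFound
  have hinner : ∀ (L : Int) (found : List (Int × String)),
      (if PySem.Str.len (PySem.Str.lower w) < L then found else
        ((pvBuckets tlds).getD (pvSuf w L) []).foldl (fun found p =>
          if !(w == p.2) then
            if !(pvPre w L == "") && PySem.Str.startswith (pvPre w L) "." == false then
              found ++ [(p.1, String.ofList ((pvPre w L).toList ++ ['.'] ++ (pvSuf w L).toList))]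
            else found
          else found) found)
      = found ++ ((PySem.List.enumerate tlds 0).filter (pvP w L)).map (pvOut w L) := by
    intro L found
    by_cases hlt : PySem.Str.len (PySem.Str.lower w) < L
    · have hnil : (PySem.List.enumerate tlds 0).filter (pvP w L) = [] := by
        apply List.filter_eq_nil_iff.mpr
        intro p _
        unfold pvP
        rw [if_pos hlt]
        simp
      rw [if_pos hlt, hnil]
      simp
    · rw [if_neg hlt, pvBuckets_getD]
      have hbody : ∀ (acc : List (Int × String)) (p : Int × String),
          p ∈ (PySem.List.enumerate tlds 0).filter (fun p => PySem.Str.lower p.2 == pvSuf w L) →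
          (if !(w == p.2) then
            if !(pvPre w L == "") && PySem.Str.startswith (pvPre w L) "." == false then
              acc ++ [(p.1, String.ofList ((pvPre w L).toList ++ ['.'] ++ (pvSuf w L).toList))]
            else acc
          else acc)
          = if pvC w L p then acc ++ [pvOut w L p] else acc := by
        intro acc p _
        by_cases h1 : (w == p.2) = true <;>
          by_cases h2 : (!(pvPre w L == "") && PySem.Str.startswith (pvPre w L) "." == false) = true <;>
            simp_all [pvC, pvOut]
      have hfilt : ((PySem.List.enumerate tlds 0).filter
                (fun p => PySem.Str.lower p.2 == pvSuf w L)).filter (pvC w L)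
            = (PySem.List.enumerate tlds 0).filter (pvP w L) := by
        rw [List.filter_filter]
        apply List.filter_congr
        intro p _
        unfold pvP
        rw [if_neg hlt, Bool.and_comm]
      calc ((PySem.List.enumerate tlds 0).filter
              (fun p => PySem.Str.lower p.2 == pvSuf w L)).foldl _ found
          = ((PySem.List.enumerate tlds 0).filter
              (fun p => PySem.Str.lower p.2 == pvSuf w L)).foldl
                (fun acc p => if pvC w L p then acc ++ [pvOut w L p] else acc) found := by
            apply PySem.List.foldl_congr_mem
            intro acc p hp
            exact hbody acc p hp
        _ = found ++ ((PySem.List.enumerate tlds 0).filter (pvP w L)).map (pvOut w L) := by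
            rw [PySem.List.foldl_append_if, hfilt]
  calc (pvLengths tlds).foldl _ []
      = (pvLengths tlds).foldl (fun found L =>
          found ++ ((PySem.List.enumerate tlds 0).filter (pvP w L)).map (pvOut w L)) [] := by
        apply PySem.List.foldl_congr_mem
        intro found L _
        exact hinner L found
    _ = _ := by rw [PySem.List.foldl_append_eq_flatMap]; simp

-- singleton prefix reads the head
theorem pvSingleton_prefix (a : Char) (xs : List Char) : [a] <+: xs ↔ xs.head? = some a := by
  cases xs with
  | nil => simp
  | cons y ys => simp [List.cons_prefix_cons, eq_comm]

-- length of a lowercased string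
theorem lower_len (cs : List Char) : (PySem.Chars.lower cs).length = cs.length := by
  simp [PySem.Chars.lower]

theorem pvSuf_toList (w : String) (L : Int) (hL : 0 < L) (hLn : L ≤ (w.toList.length : Int)) :
    (pvSuf w L).toList
      = (PySem.Chars.lower w.toList).drop ((w.toList.length - L.toNat : Nat)) := by
  have hlen : PySem.Str.len (PySem.Str.lower w) = (w.toList.length : Int) := by
    simp [PySem.Str.len_eq, lower_len]
  unfold pvSuf
  rw [show (PySem.Str.slice (PySem.Str.lower w)
        (some (PySem.Str.len (PySem.Str.lower w) - L)) none).toList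
      = PySem.List.slice (PySem.Str.lower w).toList
          (some (PySem.Str.len (PySem.Str.lower w) - L)) none from by simp]
  rw [PySem.List.slice_from _ (by rw [hlen]; omega)]
  rw [hlen]
  rw [show ((w.toList.length : Int) - L).toNat = (w.toList.length - L.toNat : Nat) from by omega]
  simp

theorem pvPre_toList (w : String) (L : Int) (hL : 0 < L) (hLn : L ≤ (w.toList.length : Int)) :
    (pvPre w L).toList = List.take ((w.toList.length - L.toNat : Nat)) w.toList := by
  unfold pvPre
  rw [show (PySem.Str.slice w none (some (PySem.Str.len w - L))).toList
      = PySem.List.slice w.toList none (some (PySem.Str.len w - L)) from by simp]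
  rw [PySem.List.slice_to _ (by rw [PySem.Str.len_eq]; omega)]
  congr 1
  rw [PySem.Str.len_eq]
  omega

theorem pvM_toList (w t : String) (ht : t.toList ≠ []) :
    (pvM w t).toList
      = List.take ((w.toList.length - t.toList.length : Nat)) w.toList
          ++ '.' :: (PySem.Str.lower t).toList := by
  unfold pvM
  rw [String.toList_ofList]
  rw [show (PySem.Str.slice w none (some (-(PySem.Str.len t)))).toList
      = PySem.List.slice w.toList none (some (-(PySem.Str.len t))) from by simp]
  rw [PySem.Str.len_eq]
  rw [PySem.List.slice_to_neg_natCast _ _ (List.length_pos_iff.mpr ht)]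
  simp

-- elements of pvLengths are positive
theorem pvLengths_pos (tlds : List String) : ∀ L ∈ pvLengths tlds, 0 < L := by
  intro L hL
  unfold pvLengths at hL
  have hmem := (PySem.List.sorted_perm _ _ _).mem_iff.mp hL
  rw [PySem.Set.mem_ofList] at hmem
  obtain ⟨t, ht, rfl⟩ := List.mem_map.mp hmem
  have hne : t.toList ≠ [] := by
    intro hnil
    have : t = "" := String.toList_eq_nil_iff.mp hnil
    subst this
    simpa using (List.mem_filter.mp ht).2
  have : 0 < t.toList.length := List.length_pos_iff.mpr hne
  simp only [PySem.Str.len_eq]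
  exact_mod_cast this

theorem pvLengths_nodup (tlds : List String) : (pvLengths tlds).Nodup := by
  unfold pvLengths
  exact (PySem.List.sorted_perm _ _ _).nodup_iff.mpr (PySem.Set.nodup_ofList _)

theorem pvLengths_mem (tlds : List String) (t : String) (ht : t ∈ tlds) (hne : t.toList ≠ []) :
    PySem.Str.len t ∈ pvLengths tlds := by
  unfold pvLengths
  rw [(PySem.List.sorted_perm _ _ _).mem_iff, PySem.Set.mem_ofList]
  apply List.mem_map_of_mem
  rw [List.mem_filter]
  refine ⟨ht, ?_⟩
  simpa using fun h => hne (String.toList_eq_nil_iff.mpr h)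

-- A's condition forces a nonempty tld
theorem pvQ_len_pos (w t : String) (h : pvQ w t = true) : t.toList ≠ [] := by
  intro hnil
  have ht : t = "" := String.toList_eq_nil_iff.mp hnil
  subst ht
  have hm : (pvM w "").toList = ['.'] := by
    simp [pvM, PySem.Str.len_eq, PySem.List.slice_to (xs := w.toList) (b := 0) le_rfl,
      PySem.Chars.lower]
  have h2 : PySem.Chars.startswith (pvM w "").toList ['.'] = false := by
    simp [pvQ] at h
    exact h.2
  rw [hm] at h2
  exact absurd h2 (by decide)

-- the master pointwise identity between B's per-length test and A's test
theorem pvP_eq (w : String) (hw : (w == "") = false) (L : Int) (hL : 0 < L) (p : Int × String) :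
    pvP w L p = (pvQ w p.2 && (PySem.Str.len p.2 == L)) := by
  have hlen : PySem.Str.len (PySem.Str.lower w) = (w.toList.length : Int) := by
    simp [PySem.Str.len_eq, lower_len]
  have hTlow : (PySem.Str.lower p.2).toList.length = p.2.toList.length := by
    rw [PySem.Str.toList_lower]
    exact lower_len _
  by_cases hlt : PySem.Str.len (PySem.Str.lower w) < L
  · unfold pvP
    rw [if_pos hlt]
    symm
    cases hq : pvQ w p.2 with
    | false => simp
    | true =>
      cases hlen2 : (PySem.Str.len p.2 == L) with
      | false => simp
      | true =>
        exfalso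
        have hq' := hq
        simp only [pvQ, Bool.and_eq_true] at hq'
        have hend := hq'.1.1.1
        rw [PySem.Str.endswith_eq] at hend
        have hsuffix := (PySem.Chars.endswith_iff _ _).mp hend
        have hlenle := hsuffix.length_le
        rw [hTlow] at hlenle
        have h5 : (PySem.Str.lower w).toList.length = w.toList.length := by
          rw [PySem.Str.toList_lower]; exact lower_len _
        rw [h5] at hlenle
        have hlen2' : (p.2.toList.length : Int) = L := by
          have := beq_iff_eq.mp hlen2
          rwa [PySem.Str.len_eq] at this
        rw [hlen] at hlt
        omega
  · unfold pvP
    rw [if_neg hlt]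
    rw [hlen] at hlt
    have hLn : L ≤ (w.toList.length : Int) := not_lt.mp hlt
    have hWnil : w.toList ≠ [] := fun h => by
      rw [String.toList_eq_nil_iff.mp h] at hw
      simp at hw
    -- two directions
    have fwd : ((PySem.Str.lower p.2 == pvSuf w L) && pvC w L p) = true →
        (pvQ w p.2 && (PySem.Str.len p.2 == L)) = true := by
      intro h
      obtain ⟨h1, h2⟩ := (Bool.and_eq_true _ _).mp h
      have h1' : (PySem.Str.lower p.2).toList = (pvSuf w L).toList :=
        congrArg String.toList (eq_of_beq h1)
      have hT : p.2.toList.length = L.toNat := by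
        have h4 : (pvSuf w L).toList.length = L.toNat := by
          rw [pvSuf_toList w L hL hLn, List.length_drop, lower_len]
          omega
        rw [← hTlow, h1', h4]
      have hTnil : p.2.toList ≠ [] := by
        intro h
        rw [h] at hT
        simp at hT
        omega
      obtain ⟨h2a, h2b, h2c⟩ : ¬w = p.2 ∧ ¬pvPre w L = "" ∧
          PySem.Chars.startswith (pvPre w L).toList ['.'] = false := by
        simpa [pvC] using h2
      have hpreL : (pvPre w L).toList = List.take ((w.toList.length - L.toNat : Nat)) w.toList :=
        pvPre_toList w L hL hLn
      have hprenil : (pvPre w L).toList ≠ [] := by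
        intro h
        rw [String.toList_eq_nil_iff.mp h] at h2b
        simp at h2b
      have hMl : (pvM w p.2).toList
          = (pvPre w L).toList ++ '.' :: (PySem.Str.lower p.2).toList := by
        rw [pvM_toList w p.2 hTnil, hT, hpreL]
      -- startswith of the match is false
      have hsw : PySem.Str.startswith (pvM w p.2) "." = false := by
        rw [PySem.Str.startswith_eq]
        rw [show ("." : String).toList = ['.'] from rfl]
        apply Bool.eq_false_iff.mpr
        intro hcon
        have := (PySem.Chars.startswith_iff _ _).mp hcon
        rw [pvSingleton_prefix, hMl, List.head?_append_of_ne_nil _ hprenil] at this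
        have hpre_head : ¬ (['.'] <+: (pvPre w L).toList) := by
          intro hc
          rw [(PySem.Chars.startswith_iff _ _).mpr hc] at h2c
          simp at h2c
        rw [pvSingleton_prefix] at hpre_head
        exact hpre_head this
      have hend : PySem.Str.endswith (PySem.Str.lower w) (PySem.Str.lower p.2) = true := by
        rw [PySem.Str.endswith_eq]
        apply (PySem.Chars.endswith_iff _ _).mpr
        rw [PySem.Str.toList_lower] at h1' ⊢
        rw [h1', pvSuf_toList w L hL hLn, PySem.Str.toList_lower]
        exact List.drop_suffix _ _
      have hwp : (w == p.2) = false := beq_eq_false_iff_ne.mpr h2a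
      have hlenB : (PySem.Str.len p.2 == L) = true :=
        beq_iff_eq.mpr (by rw [PySem.Str.len_eq, hT]; omega)
      have hq : pvQ w p.2 = true := by
        unfold pvQ
        rw [hend, hw, hwp, hsw]
        rfl
      rw [hq, hlenB]
      rfl
    have bwd : (pvQ w p.2 && (PySem.Str.len p.2 == L)) = true →
        ((PySem.Str.lower p.2 == pvSuf w L) && pvC w L p) = true := by
      intro h
      obtain ⟨hq, hlen2⟩ := (Bool.and_eq_true _ _).mp h
      have hT : (p.2.toList.length : Int) = L := by
        have := beq_iff_eq.mp hlen2
        rwa [PySem.Str.len_eq] at this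
      have hTnil : p.2.toList ≠ [] := by
        intro hc
        rw [hc] at hT
        simp at hT
        omega
      obtain ⟨h123, hsw'⟩ := (Bool.and_eq_true _ _).mp hq
      obtain ⟨h12, hwt⟩ := (Bool.and_eq_true _ _).mp h123
      obtain ⟨hend, _⟩ := (Bool.and_eq_true _ _).mp h12
      have hsw : PySem.Str.startswith (pvM w p.2) "." = false := by simpa using hsw' 
      -- the suffix equality
      rw [PySem.Str.endswith_eq] at hend
      have hsuffix := (PySem.Chars.endswith_iff _ _).mp hend
      have hidx : (PySem.Str.lower w).toList.length - (PySem.Str.lower p.2).toList.length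
          = (w.toList.length - L.toNat : Nat) := by
        rw [hTlow, PySem.Str.toList_lower (s := w), lower_len]
        omega
      have h1 : (PySem.Str.lower p.2).toList = (pvSuf w L).toList := by
        rw [List.suffix_iff_eq_drop.mp hsuffix, hidx, pvSuf_toList w L hL hLn,
          PySem.Str.toList_lower (s := w)]
      have hMl : (pvM w p.2).toList
          = List.take ((w.toList.length - L.toNat : Nat)) w.toList
              ++ '.' :: (PySem.Str.lower p.2).toList := by
        rw [pvM_toList w p.2 hTnil]
        rw [show (w.toList.length - p.2.toList.length : Nat)
            = (w.toList.length - L.toNat : Nat) from by omega]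
      have hswl : ¬ ((pvM w p.2).toList.head? = some '.') := by
        intro hc
        have : PySem.Str.startswith (pvM w p.2) "." = true := by
          rw [PySem.Str.startswith_eq, show ("." : String).toList = ['.'] from rfl]
          exact (PySem.Chars.startswith_iff _ _).mpr ((pvSingleton_prefix _ _).mpr hc)
        rw [this] at hsw
        simp at hsw
      have hpreL : (pvPre w L).toList = List.take ((w.toList.length - L.toNat : Nat)) w.toList :=
        pvPre_toList w L hL hLn
      have hprenil : (pvPre w L).toList ≠ [] := by
        intro hc
        rw [hpreL] at hc
        rw [hMl, hc] at hswl
        simp at hswl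
      have hhead : (pvPre w L).toList.head? ≠ some '.' := by
        intro hc
        rw [hMl, ← hpreL, List.head?_append_of_ne_nil _ hprenil] at hswl
        exact hswl hc
      have hpreB : (pvPre w L == "") = false :=
        beq_eq_false_iff_ne.mpr (fun hc => hprenil (String.toList_eq_nil_iff.mpr hc))
      have hswpre : PySem.Str.startswith (pvPre w L) "." = false := by
        apply Bool.eq_false_iff.mpr
        intro hc
        rw [PySem.Str.startswith_eq, show ("." : String).toList = ['.'] from rfl] at hc
        exact hhead ((pvSingleton_prefix _ _).mp ((PySem.Chars.startswith_iff _ _).mp hc))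
      have hbeq : (PySem.Str.lower p.2 == pvSuf w L) = true :=
        beq_iff_eq.mpr (String.toList_inj.mp h1)
      have hpvC : pvC w L p = true := by
        unfold pvC
        rw [hwt, hpreB, hswpre]
        rfl
      rw [hbeq, hpvC]
      rfl
    cases hx : ((PySem.Str.lower p.2 == pvSuf w L) && pvC w L p) with
    | true => rw [fwd hx]
    | false =>
      cases hy : (pvQ w p.2 && (PySem.Str.len p.2 == L)) with
      | true =>
        rw [bwd hy] at hx
        exact absurd hx (by simp)
      | false => rfl


-- on elements passing the test, B's match value is A's
theorem pvOut_eq (w : String) (L : Int) (hL : 0 < L) (p : Int × String)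
    (hp : pvP w L p = true) : pvOut w L p = pvF w p := by
  unfold pvP at hp
  by_cases hlt : PySem.Str.len (PySem.Str.lower w) < L
  · rw [if_pos hlt] at hp
    exact absurd hp (by simp)
  · rw [if_neg hlt] at hp
    obtain ⟨h1, h2⟩ := (Bool.and_eq_true _ _).mp hp
    have hlen : PySem.Str.len (PySem.Str.lower w) = (w.toList.length : Int) := by
      simp [PySem.Str.len_eq, lower_len]
    rw [hlen] at hlt
    have hLn : L ≤ (w.toList.length : Int) := not_lt.mp hlt
    have h1' : (PySem.Str.lower p.2).toList = (pvSuf w L).toList :=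
      congrArg String.toList (eq_of_beq h1)
    have hT : p.2.toList.length = L.toNat := by
      have h3 : (PySem.Str.lower p.2).toList.length = p.2.toList.length := by
        rw [PySem.Str.toList_lower]
        exact lower_len _
      have h4 : (pvSuf w L).toList.length = L.toNat := by
        rw [pvSuf_toList w L hL hLn, List.length_drop, lower_len]
        omega
      calc p.2.toList.length = (PySem.Str.lower p.2).toList.length := h3.symm
        _ = (pvSuf w L).toList.length := congrArg List.length h1'
        _ = L.toNat := h4
    have hTnil : p.2.toList ≠ [] := by
      intro h
      rw [h] at hT
      simp at hT
      omega
    unfold pvOut pvF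
    simp only [Prod.mk.injEq]
    refine ⟨by trivial, ?_⟩
    apply String.toList_inj.mp
    rw [String.toList_ofList]
    show (pvPre w L).toList ++ ['.'] ++ (pvSuf w L).toList = (pvM w p.2).toList
    rw [pvM_toList w p.2 hTnil, hT, pvPre_toList w L hL hLn, ← h1']
    simp

-- generic regrouping permutation: flatMap of per-key filters ≍ one filter
theorem pvFlatMap_filter_perm {α β : Type} [DecidableEq β] (ls : List β) (e : List α)
    (P : β → α → Bool) (Q : α → Bool) (key : α → β)
    (hnd : ls.Nodup)
    (hiff : ∀ L ∈ ls, ∀ p ∈ e, P L p = (Q p && (key p == L)))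
    (hmem : ∀ p ∈ e, Q p = true → key p ∈ ls) :
    (ls.flatMap (fun L => e.filter (P L))).Perm (e.filter Q) := by
  induction ls generalizing Q with
  | nil =>
    have : e.filter Q = [] :=
      List.filter_eq_nil_iff.mpr (fun p hp hQ => by simpa using hmem p hp hQ)
    simp [this]
  | cons l ls ih =>
    obtain ⟨hl, hnd2⟩ := List.nodup_cons.mp hnd
    simp only [List.flatMap_cons]
    have h1 : e.filter (P l) = e.filter (fun p => Q p && (key p == l)) :=
      List.filter_congr (fun p hp => hiff l List.mem_cons_self p hp)
    have ih' : (ls.flatMap (fun L => e.filter (P L))).Perm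
        (e.filter (fun p => Q p && !(key p == l))) := by
      apply ih _ hnd2
      · intro L hL p hp
        rw [hiff L (List.mem_cons_of_mem l hL) p hp]
        have hLl : L ≠ l := fun h => hl (h ▸ hL)
        by_cases hk : key p = L
        · simp [hk]
          exact fun _ => hLl
        · have hf : (key p == L) = false := beq_eq_false_iff_ne.mpr hk
          simp [hf]
      · intro p hp hQ'
        simp only [Bool.and_eq_true, Bool.not_eq_eq_eq_not, Bool.not_true, beq_eq_false_iff_ne,
          ne_eq] at hQ'
        rcases List.mem_cons.mp (hmem p hp hQ'.1) with h | h
        · exact absurd h hQ'.2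
        · exact h
    have h2 : ((e.filter Q).filter (fun p => key p == l)
        ++ (e.filter Q).filter (fun p => !(key p == l))).Perm (e.filter Q) :=
      List.filter_append_perm _ _
    rw [List.filter_filter, List.filter_filter] at h2
    rw [show e.filter (fun a => (key a == l) && Q a) = e.filter (fun p => Q p && (key p == l)) from
          List.filter_congr (fun p _ => Bool.and_comm _ _),
        show e.filter (fun a => !(key a == l) && Q a) = e.filter (fun p => Q p && !(key p == l)) from
          List.filter_congr (fun p _ => Bool.and_comm _ _)] at h2
    have h3 : (e.filter (P l) ++ ls.flatMap (fun L => e.filter (P L))).Perm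
        (e.filter (fun p => Q p && (key p == l)) ++ e.filter (fun p => Q p && !(key p == l))) := by
      rw [h1]
      exact List.Perm.append_left _ ih'
    exact h3.trans h2

-- projecting the second component of a filtered enumeration
theorem pvFilter_enumerate_map_snd {α : Type} (xs : List α) (s : Int) (Q : α → Bool) :
    ((PySem.List.enumerate xs s).filter (fun p => Q p.2)).map (·.2) = xs.filter Q := by
  induction xs generalizing s with
  | nil => simp [PySem.List.enumerate_nil]
  | cons x xs ih =>
    rw [PySem.List.enumerate_cons]
    by_cases h : Q x = true <;> simp [h, ih]

-- the per-word equality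
set_option maxHeartbeats 1000000 in
theorem pvWord_eq (tlds : List String) (w : String) :
    (if w == "" then [] else
      (PySem.List.sorted (pvFound tlds w) (fun p => p.1) false).map (·.2))
    = (tlds.filter (fun t => pvQ w t)).map (pvM w) := by
  by_cases hw : (w == "") = true
  · have : tlds.filter (fun t => pvQ w t) = [] := by
      apply List.filter_eq_nil_iff.mpr
      intro t _
      simp [pvQ, hw]
    simp [hw, this]
  · rw [if_neg hw]
    have hw' : (w == "") = false := Bool.not_eq_true _ ▸ (by simpa using hw)
    have hperm : (((PySem.List.enumerate tlds 0).filter (fun p => pvQ w p.2)).map (pvF w)).Perm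
        (pvFound tlds w) := by
      rw [pvFound_flat]
      rw [List.flatMap_congr (g := fun L =>
            ((PySem.List.enumerate tlds 0).filter (pvP w L)).map (pvF w))
          (fun L hL => List.map_eq_map_iff.mpr
            (fun p hp => pvOut_eq w L (pvLengths_pos tlds L hL) p (List.of_mem_filter hp)))]
      rw [← List.map_flatMap]
      refine ((pvFlatMap_filter_perm (pvLengths tlds) (PySem.List.enumerate tlds 0)
        (pvP w) (fun p => pvQ w p.2) (fun p => PySem.Str.len p.2)
        (pvLengths_nodup tlds) ?_ ?_).map (pvF w)).symm
      · intro L hL p _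
        exact pvP_eq w hw' L (pvLengths_pos tlds L hL) p
      · intro p hp hQ
        have hmem : p.2 ∈ tlds := by
          obtain ⟨k, hk, rfl⟩ := (PySem.List.mem_enumerate_iff tlds 0 p).mp hp
          exact List.getElem_mem hk
        exact pvLengths_mem tlds p.2 hmem (pvQ_len_pos w p.2 hQ)
    have hpair : (((PySem.List.enumerate tlds 0).filter (fun p => pvQ w p.2)).map (pvF w)).Pairwise
        (fun a b => a.1 < b.1) := by
      have h0 : ((PySem.List.enumerate tlds 0).filter (fun p => pvQ w p.2)).Pairwise
          (fun a b => a.1 < b.1) :=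
        List.Pairwise.filter _ (PySem.List.pairwise_lt_enumerate tlds 0)
      refine List.pairwise_map.mpr (List.Pairwise.imp ?_ h0)
      intro a b hab
      show (pvF w a).1 < (pvF w b).1
      simpa [pvF] using hab
    rw [PySem.List.sorted_eq_of_perm_of_pairwise_lt _ _ _ hperm hpair]
    rw [List.map_map]
    have : ((·.2) ∘ pvF w) = fun p : Int × String => pvM w p.2 := rfl
    rw [this]
    rw [show (fun p : Int × String => pvM w p.2) = (pvM w ∘ (·.2)) from rfl, ← List.map_map]
    rw [pvFilter_enumerate_map_snd]

-- ===== VERDICT (by name: the statement is the Claim_ definition above) =====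
theorem find_domains_spec : Claim_equal_find_domains := by
  intro words tlds _
  show find_domains words tlds = find_domains_alt words tlds
  rw [pvA_flat, pvB_flat]
  exact List.flatMap_congr (fun w _ => (pvWord_eq tlds w).symm)
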